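-- pv_equiv track=rewrite | github.com/tjdud0123/daily_algorithm | 파이썬/그래프관련.py | get_min_times
-- ===== SOURCE A (Python) =====
-- def get_min_times(levels, pre_order, cook_time):
--     temp = sorted(levels.items(), key=lambda x: x[1])
--     min_time = {}
--     for cook, level in temp:
--         if level == 1:
--             min_time[cook] = cook_time[cook]
--         else:
--             min_time[cook] = cook_time[cook] + \
--                 max([min_time[c] for c in pre_order[cook]])
--     return min_time
-- ===== SOURCE B (Python) =====
-- def get_min_times(levels, pre_order, cook_time):
--     memo = {}
--
--     def solve(cook):
--         if cook not in memo:
--             if levels[cook] == 1: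
--                 memo[cook] = cook_time[cook]
--             else:
--                 memo[cook] = cook_time[cook] + max(solve(c) for c in pre_order[cook])
--         return memo[cook]
--
--     for cook, _level in sorted(levels.items(), key=lambda x: x[1]):
--         solve(cook)
--     return memo
-- ===== Notes on version B (the rewrite author's own statement) =====
-- stated objective: alternative
-- what changed: Replaces the sorted-order bottom-up DP loop (which reads each predecessor's value out of the dict filled so far) with a memoized recursive solve() over the dependency DAG: each cook's completion time is computed on demand from its predecessors and cached, the level-sorted loop only triggers the recursion and fixes the output key order.
import Mathlib
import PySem

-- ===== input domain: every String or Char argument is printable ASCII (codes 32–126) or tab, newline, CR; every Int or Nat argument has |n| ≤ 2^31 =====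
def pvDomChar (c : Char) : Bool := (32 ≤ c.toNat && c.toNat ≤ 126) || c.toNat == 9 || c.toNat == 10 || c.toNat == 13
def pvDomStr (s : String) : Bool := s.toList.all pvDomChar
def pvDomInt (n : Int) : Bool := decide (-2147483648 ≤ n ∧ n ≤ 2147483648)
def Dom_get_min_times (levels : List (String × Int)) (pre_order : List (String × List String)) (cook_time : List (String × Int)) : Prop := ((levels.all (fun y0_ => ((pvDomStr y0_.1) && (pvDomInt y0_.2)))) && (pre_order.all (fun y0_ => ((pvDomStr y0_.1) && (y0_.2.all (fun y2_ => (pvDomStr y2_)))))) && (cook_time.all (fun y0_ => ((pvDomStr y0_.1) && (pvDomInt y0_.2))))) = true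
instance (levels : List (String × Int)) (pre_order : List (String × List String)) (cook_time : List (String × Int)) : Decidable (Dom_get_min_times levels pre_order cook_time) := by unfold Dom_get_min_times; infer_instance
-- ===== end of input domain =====

-- B replaces A's sorted-order bottom-up DP loop by a memoized recursive solve() over the
-- dependency DAG (alternative decomposition, same cost); equal output (value and key order) on Pre_.


-- ===== PORT A =====
-- literal transliteration of A: sort the dict items by level, then one DP pass filling min_time;
-- dict lookups that Python raises on (KeyError / max of empty) are getD-defaults here, excluded by Pre_.
def get_min_times (levels : List (String × Int)) (pre_order : List (String × List String)) (cook_time : List (String × Int)) : List (String × Int) :=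
  let L := PySem.Dict.ofList levels
  let P := PySem.Dict.ofList pre_order
  let C := PySem.Dict.ofList cook_time
  let temp := PySem.List.sorted L.items (fun x => x.2) false
  let min_time := temp.foldl (fun (mt : PySem.Dict String Int) p =>
      if p.2 == 1 then mt.insert p.1 (C.getD p.1 0)
      else mt.insert p.1 (C.getD p.1 0 +
        (PySem.List.max? ((P.getD p.1 []).map (fun c => mt.getD c 0)) (fun y => y)).getD 0))
    PySem.Dict.empty
  min_time.items

-- ===== PORT B =====
-- transliteration of Source B's solve(): memoized recursion over the DAG; the Nat fuel bounds the
-- recursion depth (Python's recursion limit); fuel 0 ≈ RecursionError, only reachable outside Pre_.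
def gmtSolve (L : PySem.Dict String Int) (P : PySem.Dict String (List String)) (C : PySem.Dict String Int) :
    Nat → PySem.Dict String Int → String → PySem.Dict String Int × Int
  | 0, memo, cook => (memo, memo.getD cook 0)
  | fuel+1, memo, cook =>
    if memo.contains cook then (memo, memo.getD cook 0)
    else if L.getD cook 0 == 1 then
      (memo.insert cook (C.getD cook 0), C.getD cook 0)
    else
      let r := (P.getD cook []).foldl (fun (acc : PySem.Dict String Int × List Int) c =>
          let s := gmtSolve L P C fuel acc.1 c
          (s.1, acc.2 ++ [s.2])) (memo, ([] : List Int))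
      let v := C.getD cook 0 + (PySem.List.max? r.2 (fun y => y)).getD 0
      (r.1.insert cook v, v)

def get_min_times_alt (levels : List (String × Int)) (pre_order : List (String × List String)) (cook_time : List (String × Int)) : List (String × Int) :=
  let L := PySem.Dict.ofList levels
  let P := PySem.Dict.ofList pre_order
  let C := PySem.Dict.ofList cook_time
  ((PySem.List.sorted L.items (fun x => x.2) false).foldl
      (fun memo p => (gmtSolve L P C L.size memo p.1).1) PySem.Dict.empty).items

-- ===== PRECONDITION & SPEC =====
-- exactly the inputs on which Python A returns: every cook has a cook_time, and every cook of
-- level ≠ 1 has a nonempty predecessor list whose members all appear strictly earlier in the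
-- stable level-sorted order (otherwise A raises KeyError / ValueError).
def Pre_get_min_times (levels : List (String × Int)) (pre_order : List (String × List String)) (cook_time : List (String × Int)) : Prop :=
  let L := PySem.Dict.ofList levels
  let P := PySem.Dict.ofList pre_order
  let C := PySem.Dict.ofList cook_time
  let temp := PySem.List.sorted L.items (fun x => x.2) false
  ∀ i, (h : i < temp.length) → C.contains (temp[i].1) = true ∧
    (temp[i].2 ≠ 1 → P.contains (temp[i].1) = true ∧ P.getD (temp[i].1) [] ≠ [] ∧
      ∀ c ∈ P.getD (temp[i].1) [], c ∈ (temp.take i).map (·.1))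
instance (levels : List (String × Int)) (pre_order : List (String × List String)) (cook_time : List (String × Int)) : Decidable (Pre_get_min_times levels pre_order cook_time) := by unfold Pre_get_min_times; infer_instance

def pvWitness_get_min_times : (List (String × Int)) × (List (String × List String)) × (List (String × Int)) :=
  ([("a", 1), ("b", 2)], [("b", ["a"])], [("a", 3), ("b", 4)])

def Spec_get_min_times (levels : List (String × Int)) (pre_order : List (String × List String)) (cook_time : List (String × Int)) (out : List (String × Int)) : Prop := out = get_min_times_alt levels pre_order cook_time
instance (levels : List (String × Int)) (pre_order : List (String × List String)) (cook_time : List (String × Int)) (out : List (String × Int)) : Decidable (Spec_get_min_times levels pre_order cook_time out) := by unfold Spec_get_min_times; infer_instance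

-- ===== CLAIM (what is proved, stated in full; the proofs are below) =====
def Claim_equal_get_min_times : Prop := ∀ (levels : List (String × Int)) (pre_order : List (String × List String)) (cook_time : List (String × Int)), Dom_get_min_times levels pre_order cook_time → Pre_get_min_times levels pre_order cook_time → Spec_get_min_times levels pre_order cook_time (get_min_times levels pre_order cook_time)

-- ===== LEMMAS AND PROOFS =====

-- solve() on an already-memoized cook returns the cached value and leaves the memo unchanged.
theorem gmtSolve_cached (L : PySem.Dict String Int) (P : PySem.Dict String (List String)) (C : PySem.Dict String Int)
    (fuel : Nat) (memo : PySem.Dict String Int) (cook : String) (h : memo.contains cook = true) :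
    gmtSolve L P C fuel memo cook = (memo, memo.getD cook 0) := by
  cases fuel with
  | zero => rfl
  | succ fuel => simp [gmtSolve, h]

-- the value-collecting fold over predecessors that are all memoized: memo unchanged, values read off.
theorem gmtFold_cached (L : PySem.Dict String Int) (P : PySem.Dict String (List String)) (C : PySem.Dict String Int)
    (fuel : Nat) (pre : List String) : ∀ (memo : PySem.Dict String Int) (acc : List Int),
    (∀ c ∈ pre, memo.contains c = true) →
    pre.foldl (fun (acc : PySem.Dict String Int × List Int) c =>
        let s := gmtSolve L P C fuel acc.1 c
        (s.1, acc.2 ++ [s.2])) (memo, acc)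
      = (memo, acc ++ pre.map (fun c => memo.getD c 0)) := by
  induction pre with
  | nil => intro memo acc _; simp
  | cons c pre ih =>
    intro memo acc h
    have hc := h c (by simp)
    simp only [List.foldl_cons, gmtSolve_cached L P C fuel memo c hc]
    rw [ih memo (acc ++ [memo.getD c 0]) (fun d hd => h d (by simp [hd]))]
    simp

-- one step of solve() on a fresh cook whose predecessors (if level ≠ 1) are all memoized:
-- exactly A's DP step.
theorem gmtSolve_step (L : PySem.Dict String Int) (P : PySem.Dict String (List String)) (C : PySem.Dict String Int)
    (fuel : Nat) (memo : PySem.Dict String Int) (cook : String) (lvl : Int)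
    (hmem : (cook, lvl) ∈ L.items) (hnd : L.keys.Nodup)
    (hc : memo.contains cook = false)
    (hpre : lvl ≠ 1 → ∀ c ∈ P.getD cook [], memo.contains c = true) :
    gmtSolve L P C (fuel+1) memo cook =
      (memo.insert cook (if lvl == 1 then C.getD cook 0 else C.getD cook 0 +
          (PySem.List.max? ((P.getD cook []).map (fun c => memo.getD c 0)) (fun y => y)).getD 0),
       if lvl == 1 then C.getD cook 0 else C.getD cook 0 +
          (PySem.List.max? ((P.getD cook []).map (fun c => memo.getD c 0)) (fun y => y)).getD 0) := by
  have hL : L.getD cook 0 = lvl := PySem.Dict.getD_of_mem_items L hmem hnd 0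
  by_cases h1 : lvl = 1
  · simp [gmtSolve, hc, hL, h1]
  · have hb : (lvl == 1) = false := by simp [h1]
    simp only [gmtSolve, hc, hL, hb, Bool.false_eq_true, if_false]
    rw [gmtFold_cached L P C fuel _ memo [] (hpre h1)]
    simp

-- A's DP step as a function (definitionally the fold body of port A).
def gmtStepA (P : PySem.Dict String (List String)) (C : PySem.Dict String Int)
    (mt : PySem.Dict String Int) (p : String × Int) : PySem.Dict String Int :=
  if p.2 == 1 then mt.insert p.1 (C.getD p.1 0)
  else mt.insert p.1 (C.getD p.1 0 +
    (PySem.List.max? ((P.getD p.1 []).map (fun c => mt.getD c 0)) (fun y => y)).getD 0)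

-- main invariant: the two folds agree, walking the level-sorted list with memo keys = processed cooks.
theorem gmtFold_agree (L : PySem.Dict String Int) (P : PySem.Dict String (List String)) (C : PySem.Dict String Int)
    (fz : Nat) (hfz : 1 ≤ fz) (hLnd : L.keys.Nodup) :
    ∀ (rest done : List (String × Int)) (mt : PySem.Dict String Int),
    mt.keys = done.map (·.1) →
    (((done ++ rest).map (·.1)).Nodup) →
    (∀ p ∈ rest, p ∈ L.items) →
    (∀ i, (h : i < rest.length) → rest[i].2 ≠ 1 →
        ∀ c ∈ P.getD (rest[i].1) [], c ∈ (done ++ rest.take i).map (·.1)) →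
    rest.foldl (gmtStepA P C) mt = rest.foldl (fun memo p => (gmtSolve L P C fz memo p.1).1) mt := by
  intro rest
  induction rest with
  | nil => intro _ _ _ _ _ _; rfl
  | cons p rest ih =>
    intro done mt hk hnd hmem H
    obtain ⟨fz', rfl⟩ : ∃ f, fz = f + 1 := ⟨fz - 1, by omega⟩
    have hfresh : mt.contains p.1 = false := by
      have : p.1 ∉ mt.keys := by
        rw [hk]
        have := hnd
        simp only [List.map_append, List.map_cons] at this
        have h2 := (List.nodup_append.mp this).2.2
        intro hcon
        exact h2 p.1 hcon p.1 (by simp) rfl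
      simp only [Bool.eq_false_iff]
      intro hcon
      exact this ((PySem.Dict.contains_iff_mem_keys mt p.1).mp hcon)
    have hpre : p.2 ≠ 1 → ∀ c ∈ P.getD p.1 [], mt.contains c = true := by
      intro h1 c hc
      have := H 0 (by simp) h1 c hc
      simp only [List.take_zero, List.append_nil] at this
      exact (PySem.Dict.contains_iff_mem_keys mt c).mpr (by rw [hk]; exact this)
    set v : Int := if p.2 == 1 then C.getD p.1 0 else C.getD p.1 0 +
        (PySem.List.max? ((P.getD p.1 []).map (fun c => mt.getD c 0)) (fun y => y)).getD 0 with hv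
    have hstep : gmtSolve L P C (fz'+1) mt p.1 = (mt.insert p.1 v, v) :=
      gmtSolve_step L P C fz' mt p.1 p.2 (hmem p (by simp)) hLnd hfresh hpre
    have hA : gmtStepA P C mt p = mt.insert p.1 v := by
      rw [gmtStepA, hv]; by_cases h1 : p.2 == 1 <;> simp [h1]
    simp only [List.foldl_cons, hstep, hA]
    apply ih (done ++ [p])
    · rw [PySem.Dict.keys_insert_of_not_contains mt v hfresh, hk]; simp
    · simpa using hnd
    · intro q hq; exact hmem q (by simp [hq])
    · intro i h h1 c hc
      have := H (i+1) (by simpa using h) (by simpa using h1) c (by simpa using hc)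
      simpa [List.append_assoc] using this

-- ===== VERDICT (by name: the statement is the Claim_ definition above) =====
theorem get_min_times_spec : Claim_equal_get_min_times := by
  intro levels pre_order cook_time _ hPre
  unfold Spec_get_min_times get_min_times get_min_times_alt
  simp only []
  set L := PySem.Dict.ofList levels with hLdef
  set P := PySem.Dict.ofList pre_order
  set C := PySem.Dict.ofList cook_time
  set temp := PySem.List.sorted L.items (fun x => x.2) false with htemp
  have hperm : temp.Perm L.items := PySem.List.sorted_perm _ _ _
  have hLnd : L.keys.Nodup := PySem.Dict.nodup_keys_ofList levels
  cases hT : temp with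
  | nil => rfl
  | cons q t =>
    have hsz : 1 ≤ L.size := by
      have hlen : temp.length = L.items.length := hperm.length_eq
      rw [hT] at hlen
      have : L.size = L.items.length := rfl
      simp only [List.length_cons] at hlen
      omega
    rw [← hT]
    congr 1
    exact gmtFold_agree L P C L.size hsz hLnd temp [] PySem.Dict.empty
      (by simp [PySem.Dict.keys_empty])
      (by
        have : (temp.map (·.1)).Perm L.keys := hperm.map _
        simpa using this.nodup_iff.mpr (by exact hLnd))
      (fun p hp => hperm.mem_iff.mp hp)
      (fun i h h1 c hc => by
        have := (hPre i h).2 h1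
        simpa using this.2.2 c hc)
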